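-- pv_equiv track=rewrite | github.com/sunnytake/CodeAndDecode | 程序员面试指南/第五章-字符串问题/2-字符串中数字子串的求和.py | numSum
-- ===== SOURCE A (Python) =====
-- def numSum(str):
--     if not str:
--         return 0
--     res = 0
--     stack = []
--     index = 0
--     while index < len(str) or stack:
--         char = str[index] if index < len(str) else None
--
--         if char and '0' <= char <= '9':
--             stack.append(char)
--         else:
--             if char and char == '-':
--                 stack.append(char)
--             else:
--                 flag = True # 符号
--                 val = 0 # 数值
--                 while stack:
--                     temp = stack.pop(0)
--                     if '0' <= temp <= '9':
--                         val = val*10 + ord(temp) - ord('0')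
--                     else:
--                         flag = not flag
--                 if flag:
--                     res += val
--                 else:
--                     res -= val
--         index += 1
--     return res
-- ===== SOURCE B (Python) =====
-- def numSum(str):
--     res = 0
--     val = 0
--     sign = 1
--     for c in str:
--         if '0' <= c <= '9':
--             val = val * 10 + ord(c) - ord('0')
--         elif c == '-':
--             sign = -sign
--         else:
--             res += sign * val
--             val = 0
--             sign = 1
--     return res + sign * val
-- ===== Notes on version B (the rewrite author's own statement) =====
-- stated objective: faster
-- what changed: Replaced A's outer loop with an auxiliary stack, list.pop(0) and an inner flush loop by a single linear pass keeping a running value and a running sign.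
import Mathlib
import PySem

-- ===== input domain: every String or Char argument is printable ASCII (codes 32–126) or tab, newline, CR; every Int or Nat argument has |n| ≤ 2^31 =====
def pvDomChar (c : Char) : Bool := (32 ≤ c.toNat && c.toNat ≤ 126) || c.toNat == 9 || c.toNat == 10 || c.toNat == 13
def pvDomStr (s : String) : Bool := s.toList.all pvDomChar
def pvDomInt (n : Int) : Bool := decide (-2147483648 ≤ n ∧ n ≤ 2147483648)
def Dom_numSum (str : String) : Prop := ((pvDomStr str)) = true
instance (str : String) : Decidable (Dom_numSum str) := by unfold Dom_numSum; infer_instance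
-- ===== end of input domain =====

-- B replaces A's stack/pop(0) two-level loop by a single linear pass with a running value and sign (objective: faster, asymptotic).

-- ===== PORT A =====
-- inner `while stack:` loop of A: pop from the front, build val / toggle flag
def numSumFlush (stack : List Char) (flag : Bool) (val : Int) : Bool × Int :=
  match stack with
  | [] => (flag, val)
  | temp :: rest =>
    if '0' ≤ temp ∧ temp ≤ '9' then
      numSumFlush rest flag (val * 10 + (temp.toNat : Int) - ('0'.toNat : Int))
    else
      numSumFlush rest (!flag) val

-- outer `while index < len(str) or stack:` loop; fuel = len+1 iterations always suffice
-- (each iteration does index += 1, and once index ≥ len the flush empties the stack)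
def numSumLoop (s : List Char) (fuel : Nat) (index : Nat) (stack : List Char) (res : Int) : Int :=
  match fuel with
  | 0 => res
  | fuel + 1 =>
    if index < s.length ∨ stack ≠ [] then
      match s[index]? with
      | some char =>
        if '0' ≤ char ∧ char ≤ '9' then
          numSumLoop s fuel (index + 1) (stack ++ [char]) res
        else if char = '-' then
          numSumLoop s fuel (index + 1) (stack ++ [char]) res
        else
          let fv := numSumFlush stack true 0
          numSumLoop s fuel (index + 1) [] (if fv.1 then res + fv.2 else res - fv.2)
      | none =>
          let fv := numSumFlush stack true 0
          numSumLoop s fuel (index + 1) [] (if fv.1 then res + fv.2 else res - fv.2)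
    else res

def numSum (str : String) : Int :=
  if str.toList = [] then 0
  else numSumLoop str.toList (str.toList.length + 1) 0 [] 0

-- ===== PORT B =====
def numSumStep (acc : Int × Int × Int) (c : Char) : Int × Int × Int :=
  if '0' ≤ c ∧ c ≤ '9' then
    (acc.1, acc.2.1 * 10 + (c.toNat : Int) - ('0'.toNat : Int), acc.2.2)
  else if c = '-' then
    (acc.1, acc.2.1, -acc.2.2)
  else
    (acc.1 + acc.2.2 * acc.2.1, 0, 1)

def numSum_alt (str : String) : Int :=
  let st := str.toList.foldl numSumStep (0, 0, 1)
  st.1 + st.2.2 * st.2.1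

-- ===== PRECONDITION & SPEC =====
def Spec_numSum (str : String) (out : Int) : Prop := out = numSum_alt str
instance (str : String) (out : Int) : Decidable (Spec_numSum str out) := by unfold Spec_numSum; infer_instance

-- ===== CLAIM (what is proved, stated in full; the proofs are below) =====
def Claim_equal_numSum : Prop := ∀ (str : String), Dom_numSum str → Spec_numSum str (numSum str)

-- ===== LEMMAS AND PROOFS =====

-- appending a digit to the stack multiplies the flushed value by 10 and adds the digit
theorem flush_append_digit (st : List Char) (f : Bool) (v : Int) (c : Char)
    (hc : '0' ≤ c ∧ c ≤ '9') :
    numSumFlush (st ++ [c]) f v =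
      ((numSumFlush st f v).1,
       (numSumFlush st f v).2 * 10 + (c.toNat : Int) - ('0'.toNat : Int)) := by
  induction st generalizing f v with
  | nil => simp [numSumFlush, hc]
  | cons t rest ih =>
    by_cases h : '0' ≤ t ∧ t ≤ '9' <;> simp [numSumFlush, h, ih]

-- appending a non-digit ('-') toggles the flushed flag
theorem flush_append_nondigit (st : List Char) (f : Bool) (v : Int) (c : Char)
    (hc : ¬ ('0' ≤ c ∧ c ≤ '9')) :
    numSumFlush (st ++ [c]) f v =
      (!(numSumFlush st f v).1, (numSumFlush st f v).2) := by
  induction st generalizing f v with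
  | nil => simp [numSumFlush, hc]
  | cons t rest ih =>
    by_cases h : '0' ≤ t ∧ t ≤ '9' <;> simp [numSumFlush, h, ih]

def signOf (f : Bool) : Int := if f then 1 else -1

-- one-step unfolding of A's outer loop (so rewriting does not unfold recursive calls)
theorem loop_succ (s : List Char) (fuel index : Nat) (stack : List Char) (res : Int) :
    numSumLoop s (fuel + 1) index stack res =
      (if index < s.length ∨ stack ≠ [] then
        match s[index]? with
        | some char =>
          if '0' ≤ char ∧ char ≤ '9' then
            numSumLoop s fuel (index + 1) (stack ++ [char]) res
          else if char = '-' then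
            numSumLoop s fuel (index + 1) (stack ++ [char]) res
          else
            let fv := numSumFlush stack true 0
            numSumLoop s fuel (index + 1) [] (if fv.1 then res + fv.2 else res - fv.2)
        | none =>
            let fv := numSumFlush stack true 0
            numSumLoop s fuel (index + 1) [] (if fv.1 then res + fv.2 else res - fv.2)
      else res) := rfl

-- main simulation: A's outer loop from position `index` equals B's fold over the
-- remaining characters, starting from the state encoded by flushing A's stack
theorem loop_eq_fold (k : Nat) : ∀ (s : List Char) (index : Nat) (stack : List Char) (res : Int),
    index + k = s.length →
    numSumLoop s (k + 1) index stack res =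
      (let st := (s.drop index).foldl numSumStep
          (res, (numSumFlush stack true 0).2, signOf (numSumFlush stack true 0).1)
       st.1 + st.2.2 * st.2.1) := by
  induction k with
  | zero =>
    intro s index stack res h
    simp only [Nat.add_zero] at h
    have hidx : ¬ index < s.length := by omega
    have hdrop : s.drop index = [] := by simp [List.drop_eq_nil_iff]; omega
    have hget : s[index]? = none := by simp; omega
    rw [loop_succ, hget, hdrop]
    by_cases hst : stack = []
    · subst hst
      simp [hidx, numSumFlush, signOf]
    · simp only [hidx, hst, ne_eq, not_false_iff, or_true, if_true, List.foldl_nil]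
      rcases hf : numSumFlush stack true 0 with ⟨flag, val⟩
      cases flag <;> simp [numSumLoop, signOf] <;> ring
  | succ k ih =>
    intro s index stack res h
    have hidx : index < s.length := by omega
    have hget : s[index]? = some s[index] := List.getElem?_eq_getElem hidx
    have hdrop : s.drop index = s[index] :: s.drop (index + 1) := by
      rw [List.drop_eq_getElem_cons hidx]
    generalize hc : s[index] = c at hget hdrop
    rw [loop_succ, hget, hdrop]
    by_cases hd : '0' ≤ c ∧ c ≤ '9'
    · -- digit: pushed on A's stack, folded into B's val
      simp only [hidx, true_or, if_true, hd, if_pos]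
      rw [ih s (index + 1) (stack ++ [c]) res (by omega)]
      simp [flush_append_digit stack true 0 c hd, numSumStep, hd]
    · by_cases hm : c = '-'
      · -- minus: pushed on A's stack, toggles B's sign
        subst hm
        simp only [hidx, true_or, if_true]
        rw [if_neg hd]
        rw [ih s (index + 1) (stack ++ ['-']) res (by omega)]
        have ht := flush_append_nondigit stack true 0 '-' hd
        rcases hf : numSumFlush stack true 0 with ⟨flag, val⟩
        rw [hf] at ht
        simp only [ht, List.foldl_cons, numSumStep, hd, if_neg, not_false_iff, if_pos]
        cases flag <;> simp [signOf]
      · -- delimiter: both flush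
        simp only [hidx, true_or, if_true, hd, hm, if_neg, not_false_iff]
        rw [ih s (index + 1) [] _ (by omega)]
        rcases hf : numSumFlush stack true 0 with ⟨flag, val⟩
        simp only [numSumStep, hd, hm, if_neg, not_false_iff, List.foldl_cons]
        cases flag <;> simp [signOf, numSumFlush] <;> ring_nf

-- ===== VERDICT (by name: the statement is the Claim_ definition above) =====
theorem numSum_spec : Claim_equal_numSum := by
  intro str _
  unfold Spec_numSum numSum numSum_alt
  by_cases h : str.toList = []
  · simp [h]
  · simp only [h, if_neg, not_false_iff]
    have := loop_eq_fold str.toList.length str.toList 0 [] 0 (by omega)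
    simp only [List.drop_zero, numSumFlush, signOf, if_pos] at this
    simpa using this
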